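-- pv_equiv track=rewrite | github.com/mskcc/beagle | runner/operator/argos_operator/v1_1_2/bin/retrieve_samples_by_query.py | get_sequencer_type
-- ===== SOURCE A (Python) =====
-- def get_sequencer_type(run_ids_list):
--     hiseq_machines = ['jax', 'pitt']
--     novaseq_machines = ['diana', 'michelle', 'aa00227']
--     run_ids_lower = [ i.lower() for i in run_ids_list if i ]
--     for machine in hiseq_machines:
--         is_hiseq = find_substr(machine, run_ids_lower)
--         if is_hiseq:
--             return "hiseq"
--     for machine in novaseq_machines:
--         is_novaseq = find_substr(machine, run_ids_lower)
--         if is_novaseq: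
--             return "novaseq"
--     return None
--
-- def find_substr(s, l):
--     return any(s in string for string in l)
-- ===== SOURCE B (Python) =====
-- def get_sequencer_type(run_ids_list):
--     hiseq_machines = ['jax', 'pitt']
--     novaseq_machines = ['diana', 'michelle', 'aa00227']
--     found_hiseq = False
--     found_novaseq = False
--     for run_id in run_ids_list:
--         if not run_id:
--             continue
--         low = run_id.lower()
--         if any(m in low for m in hiseq_machines):
--             found_hiseq = True
--         elif any(m in low for m in novaseq_machines):
--             found_novaseq = True
--     if found_hiseq:
--         return "hiseq"
--     if found_novaseq:
--         return "novaseq"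
--     return None
-- ===== Notes on version B (the rewrite author's own statement) =====
-- stated objective: simpler
-- what changed: Single pass over run_ids_list collecting two boolean flags (hiseq/novaseq) and deciding after the loop, instead of two outer loops over the machine lists each rescanning the whole lowered run-id list.
import Mathlib
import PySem

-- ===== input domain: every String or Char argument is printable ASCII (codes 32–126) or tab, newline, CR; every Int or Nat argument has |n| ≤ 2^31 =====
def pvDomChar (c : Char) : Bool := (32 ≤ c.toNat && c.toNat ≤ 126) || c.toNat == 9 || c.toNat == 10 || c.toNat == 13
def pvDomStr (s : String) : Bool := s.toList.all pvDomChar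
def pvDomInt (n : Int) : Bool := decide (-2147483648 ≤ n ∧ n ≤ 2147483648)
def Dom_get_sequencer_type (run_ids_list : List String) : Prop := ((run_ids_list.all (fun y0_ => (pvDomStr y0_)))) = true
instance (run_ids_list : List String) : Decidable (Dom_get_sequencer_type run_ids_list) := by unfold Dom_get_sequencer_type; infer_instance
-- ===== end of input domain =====

-- B replaces A's two outer loops over machine lists with one pass over the run ids collecting
-- two flags and deciding after the loop (same result, simpler single-pass decomposition).


-- ===== PORT A =====
def find_substr (s : String) (l : List String) : Bool :=
  l.any (fun str => PySem.Str.isIn s str)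

def get_sequencer_type (run_ids_list : List String) : Option String :=
  let hiseq_machines : List String := ["jax", "pitt"]
  let novaseq_machines : List String := ["diana", "michelle", "aa00227"]
  let run_ids_lower := (run_ids_list.filter (fun i => !(i == ""))).map PySem.Str.lower
  -- for machine in hiseq_machines: early return on first matching machine
  match hiseq_machines.find? (fun machine => find_substr machine run_ids_lower) with
  | some _ => some "hiseq"
  | none =>
    match novaseq_machines.find? (fun machine => find_substr machine run_ids_lower) with
    | some _ => some "novaseq"
    | none => none

-- ===== PORT B =====
-- "any(m in low for m in hiseq_machines)" / "... novaseq_machines" for one lowered run id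
def hitsHiseq (run_id : String) : Bool :=
  (["jax", "pitt"] : List String).any (fun m => PySem.Str.isIn m (PySem.Str.lower run_id))
def hitsNovaseq (run_id : String) : Bool :=
  (["diana", "michelle", "aa00227"] : List String).any (fun m => PySem.Str.isIn m (PySem.Str.lower run_id))

-- one iteration of B's loop body over the flag pair (found_hiseq, found_novaseq)
def stepB (fl : Bool × Bool) (run_id : String) : Bool × Bool :=
  if run_id == "" then fl
  else if hitsHiseq run_id then (true, fl.2)
  else if hitsNovaseq run_id then (fl.1, true)
  else fl

def get_sequencer_type_alt (run_ids_list : List String) : Option String :=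
  let flags := run_ids_list.foldl stepB (false, false)
  if flags.1 then some "hiseq"
  else if flags.2 then some "novaseq"
  else none

-- ===== PRECONDITION & SPEC =====
def Spec_get_sequencer_type (run_ids_list : List String) (out : Option String) : Prop := out = get_sequencer_type_alt run_ids_list
instance (run_ids_list : List String) (out : Option String) : Decidable (Spec_get_sequencer_type run_ids_list out) := by unfold Spec_get_sequencer_type; infer_instance

-- ===== CLAIM (what is proved, stated in full; the proofs are below) =====
def Claim_equal_get_sequencer_type : Prop := ∀ (run_ids_list : List String), Dom_get_sequencer_type run_ids_list → Spec_get_sequencer_type run_ids_list (get_sequencer_type run_ids_list)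

-- ===== LEMMAS AND PROOFS =====

-- per-id predicates: non-empty and the lowered id contains a hiseq / novaseq machine substring
def pH (i : String) : Bool := !(i == "") && hitsHiseq i
def pN (i : String) : Bool := !(i == "") && hitsNovaseq i

-- B's fold computes the two flags (novaseq flag restricted by the elif)
theorem foldB_eq (xs : List String) (a b : Bool) :
    xs.foldl stepB (a, b) = (a || xs.any pH, b || xs.any (fun i => !pH i && pN i)) := by
  induction xs generalizing a b with
  | nil => simp
  | cons x xs ih =>
    rw [List.foldl_cons, List.any_cons, List.any_cons]
    by_cases hx : (x == "") = true
    · have h1 : pH x = false := by simp [pH, hx]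
      have h2 : pN x = false := by simp [pN, hx]
      rw [stepB, if_pos hx, ih, h1, h2]
      simp
    · have hx' : (x == "") = false := eq_false_of_ne_true hx
      rw [stepB, if_neg hx]
      cases hH : hitsHiseq x with
      | true =>
        have h1 : pH x = true := by simp [pH, hx', hH]
        simp [ih, h1]
      | false =>
        have h1 : pH x = false := by simp [pH, hH]
        cases hN : hitsNovaseq x with
        | true =>
          have h2 : pN x = true := by simp [pN, hx', hN]
          simp [ih, h1, h2]
        | false =>
          have h2 : pN x = false := by simp [pN, hN]
          simp [ih, h1, h2]

theorem altB_char (xs : List String) :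
    get_sequencer_type_alt xs =
      if xs.any pH then some "hiseq"
      else if xs.any (fun i => !pH i && pN i) then some "novaseq"
      else none := by
  rw [get_sequencer_type_alt, foldB_eq]
  simp

-- A's scan over the lowered filtered list, rewritten as an any over the original list
theorem find_substr_lower (m : String) (xs : List String) :
    find_substr m ((xs.filter (fun i => !(i == ""))).map PySem.Str.lower)
      = xs.any (fun i => !(i == "") && PySem.Str.isIn m (PySem.Str.lower i)) := by
  simp [find_substr, List.any_map, List.any_filter, Function.comp]

-- distributing any over the 2- resp. 3-element machine lists
theorem anyH_split (xs : List String) :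
    xs.any pH = (xs.any (fun i => !(i == "") && PySem.Str.isIn "jax" (PySem.Str.lower i)) ||
                 xs.any (fun i => !(i == "") && PySem.Str.isIn "pitt" (PySem.Str.lower i))) := by
  induction xs with
  | nil => rfl
  | cons x xs ih =>
    simp only [List.any_cons, ih, pH, hitsHiseq, List.any_cons, List.any_nil]
    cases (x == "") <;> cases PySem.Str.isIn "jax" (PySem.Str.lower x) <;>
      cases PySem.Str.isIn "pitt" (PySem.Str.lower x) <;> simp

theorem anyN_split (xs : List String) :
    xs.any pN = (xs.any (fun i => !(i == "") && PySem.Str.isIn "diana" (PySem.Str.lower i)) ||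
                 xs.any (fun i => !(i == "") && PySem.Str.isIn "michelle" (PySem.Str.lower i)) ||
                 xs.any (fun i => !(i == "") && PySem.Str.isIn "aa00227" (PySem.Str.lower i))) := by
  induction xs with
  | nil => rfl
  | cons x xs ih =>
    simp only [List.any_cons, ih, pN, hitsNovaseq, List.any_cons, List.any_nil]
    cases (x == "") <;> cases PySem.Str.isIn "diana" (PySem.Str.lower x) <;>
      cases PySem.Str.isIn "michelle" (PySem.Str.lower x) <;>
      cases PySem.Str.isIn "aa00227" (PySem.Str.lower x) <;> simp

theorem A_char (xs : List String) :
    get_sequencer_type xs =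
      if xs.any pH then some "hiseq"
      else if xs.any pN then some "novaseq"
      else none := by
  simp only [get_sequencer_type, List.find?, find_substr_lower, anyH_split, anyN_split]
  cases hJ : xs.any (fun i => !(i == "") && PySem.Str.isIn "jax" (PySem.Str.lower i)) <;>
  cases hP : xs.any (fun i => !(i == "") && PySem.Str.isIn "pitt" (PySem.Str.lower i)) <;>
  cases hD : xs.any (fun i => !(i == "") && PySem.Str.isIn "diana" (PySem.Str.lower i)) <;>
  cases hM : xs.any (fun i => !(i == "") && PySem.Str.isIn "michelle" (PySem.Str.lower i)) <;>
  cases hA : xs.any (fun i => !(i == "") && PySem.Str.isIn "aa00227" (PySem.Str.lower i)) <;>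
    simp

-- if nothing in xs satisfies pH, the elif restriction is vacuous
theorem any_restrict (xs : List String) (h : xs.any pH = false) :
    xs.any (fun i => !pH i && pN i) = xs.any pN := by
  rw [List.any_eq_false] at h
  induction xs with
  | nil => rfl
  | cons x xs ih =>
    have hx : pH x = false := eq_false_of_ne_true (h x (by simp))
    simp only [List.any_cons, hx, ih (fun i hi => h i (by simp [hi])), Bool.not_false, Bool.true_and]

-- ===== VERDICT (by name: the statement is the Claim_ definition above) =====
theorem get_sequencer_type_spec : Claim_equal_get_sequencer_type := by
  intro xs _
  unfold Spec_get_sequencer_type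
  rw [A_char, altB_char]
  by_cases hH : xs.any pH = true
  · simp [hH]
  · have hH' := eq_false_of_ne_true hH
    rw [any_restrict xs hH']
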